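-- pv_equiv track=rewrite | github.com/kashout/madmin | factuurinput/factuurInputRegel.py | parseMoney
-- ===== SOURCE A (Python) =====
-- def parseMoney(text):
--     value = 0
--
--     segments = text.split(',')
--     if len(segments) > 2:
--         return (False, 0)
--
--     euros = 0
--     cents = 0
--     for i in range(0, len(segments[0])):
--         if segments[0][i] < '0' or segments[0][i] > '9':
--             return (False, 0)
--         euros *= 10
--         euros += ord(segments[0][i]) - ord('0')
--
--     if len(segments) == 2:
--         if len(segments[1]) > 2:
--             return (False, 0)
--         for i in range(0, len(segments[1])):
--             if segments[1][i] < '0' or segments[1][i] > '9':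
--                 return (False, 0)
--             cents *= 10
--             cents += ord(segments[1][i]) - ord('0')
--
--         if len(segments[1]) == 1:
--             cents *= 10;
--
--     value = euros*100 + cents
--
--     return (True, value)
-- ===== SOURCE B (Python) =====
-- def parseMoney(text):
--     # Single left-to-right state machine over the characters: no split(),
--     # state = (seen comma?, euros so far, cents so far, number of cents digits).
--     euros = 0
--     cents = 0
--     cents_len = 0
--     after_comma = False
--     for c in text:
--         if c == ',':
--             if after_comma:
--                 return (False, 0)
--             after_comma = True
--         elif '0' <= c <= '9':
--             if after_comma:
--                 if cents_len == 2:
--                     return (False, 0)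
--                 cents = cents * 10 + (ord(c) - 48)
--                 cents_len += 1
--             else:
--                 euros = euros * 10 + (ord(c) - 48)
--         else:
--             return (False, 0)
--     if cents_len == 1:
--         cents *= 10
--     return (True, euros * 100 + cents)
-- ===== Notes on version B (the rewrite author's own statement) =====
-- stated objective: alternative
-- what changed: B replaces split-then-per-segment-loops with a single left-to-right character state machine over the raw string (no split at all): one pass tracking whether a comma was seen, the euro and cent accumulators and the cents digit count, rejecting on a second comma, a non-digit, or a third cents digit.
import Mathlib
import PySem

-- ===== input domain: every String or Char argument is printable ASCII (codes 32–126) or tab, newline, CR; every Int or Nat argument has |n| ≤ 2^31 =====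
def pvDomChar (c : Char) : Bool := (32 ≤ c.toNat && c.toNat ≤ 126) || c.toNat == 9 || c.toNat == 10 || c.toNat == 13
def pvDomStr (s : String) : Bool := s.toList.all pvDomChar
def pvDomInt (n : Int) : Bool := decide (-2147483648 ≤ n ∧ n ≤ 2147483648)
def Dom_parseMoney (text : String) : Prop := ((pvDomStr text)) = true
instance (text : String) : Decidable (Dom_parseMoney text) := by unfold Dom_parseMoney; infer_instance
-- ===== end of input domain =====

-- B replaces split-then-per-segment-loops with a single left-to-right character state
-- machine over the raw string (no split); same cost as A (alternative decomposition).

-- ===== PORT A =====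
def pmNondigit (c : Char) : Bool := decide (c < '0') || decide ('9' < c)

-- A's per-segment loop: checks each char and accumulates Horner-style; early return -> none
def pmLoopA : List Char → Int → Option Int
  | [], acc => some acc
  | c :: cs, acc =>
      if pmNondigit c then none
      else pmLoopA cs (acc * 10 + ((c.toNat : Int) - 48))

def parseMoney (text : String) : Bool × Int :=
  match PySem.Str.split? text "," with
  | none => (false, 0)  -- unreachable: the separator "," is nonempty
  | some segments =>
  if segments.length > 2 then (false, 0)
  else
    match pmLoopA (segments.getD 0 "").toList 0 with
    | none => (false, 0)
    | some euros =>
      if segments.length == 2 then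
        let seg1 := segments.getD 1 ""
        if PySem.Str.len seg1 > 2 then (false, 0)
        else
          match pmLoopA seg1.toList 0 with
          | none => (false, 0)
          | some cents0 =>
            let cents := if PySem.Str.len seg1 == 1 then cents0 * 10 else cents0
            (true, euros * 100 + cents)
      else (true, euros * 100 + 0)

-- ===== PORT B =====
-- Source B's state machine: state = (after_comma, euros, cents, cents_len); one pass, no split
def pmGo : List Char → Bool → Int → Int → Nat → Bool × Int
  | [], _, euros, cents, clen =>
      (true, euros * 100 + (if clen == 1 then cents * 10 else cents))
  | c :: cs, after, euros, cents, clen =>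
      if c == ',' then
        if after then (false, 0) else pmGo cs true euros cents clen
      else if decide ('0' ≤ c) && decide (c ≤ '9') then
        if after then
          if clen == 2 then (false, 0)
          else pmGo cs after euros (cents * 10 + ((c.toNat : Int) - 48)) (clen + 1)
        else pmGo cs after (euros * 10 + ((c.toNat : Int) - 48)) cents clen
      else (false, 0)

def parseMoney_alt (text : String) : Bool × Int :=
  pmGo text.toList false 0 0 0

-- ===== PRECONDITION & SPEC =====
def Spec_parseMoney (text : String) (out : Bool × Int) : Prop := out = parseMoney_alt text
instance (text : String) (out : Bool × Int) : Decidable (Spec_parseMoney text out) := by unfold Spec_parseMoney; infer_instance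

-- ===== CLAIM (what is proved, stated in full; the proofs are below) =====
def Claim_equal_parseMoney : Prop := ∀ (text : String), Dom_parseMoney text → Spec_parseMoney text (parseMoney text)

-- ===== LEMMAS AND PROOFS =====

-- a simple structural split on ',' (proof-side spec of PySem.Chars.splitOn)
def splitSpec : List Char → List (List Char)
  | [] => [[]]
  | c :: r =>
      if c = ',' then [] :: splitSpec r
      else
        match splitSpec r with
        | [] => [[c]]  -- unreachable: splitSpec is never []
        | h :: t => (c :: h) :: t

theorem splitSpec_ne_nil (l : List Char) : splitSpec l ≠ [] := by
  cases l with
  | nil => simp [splitSpec]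
  | cons c r =>
    simp only [splitSpec]
    split
    · simp
    · split <;> simp

theorem splitOn_go_eq (l : List Char) :
    ∀ (fuel : Nat) (cur : List Char) (acc : List (List Char)), l.length ≤ fuel →
    PySem.Chars.splitOn.go [','] fuel l cur acc =
      acc.reverse ++ (match splitSpec l with
                      | [] => [cur.reverse]
                      | h :: t => (cur.reverse ++ h) :: t) := by
  induction l with
  | nil =>
    intro fuel cur acc _
    cases fuel <;> simp [PySem.Chars.splitOn.go, splitSpec]
  | cons c r ih =>
    intro fuel cur acc hf
    cases fuel with
    | zero => simp at hf
    | succ f =>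
      by_cases hc : c = ','
      · subst hc
        have h1 : PySem.Chars.splitOn.go [','] (f+1) (',' :: r) cur acc
            = PySem.Chars.splitOn.go [','] f r [] (cur.reverse :: acc) := by
          simp [PySem.Chars.splitOn.go, List.isPrefixOf]
        rw [h1, ih f [] (cur.reverse :: acc) (by simpa using Nat.lt_succ_iff.mp (by simpa using hf))]
        rcases hr : splitSpec r with _ | ⟨h, t⟩
        · exact absurd hr (splitSpec_ne_nil r)
        · simp [splitSpec, hr]
      · have h1 : PySem.Chars.splitOn.go [','] (f+1) (c :: r) cur acc
            = PySem.Chars.splitOn.go [','] f r (c :: cur) acc := by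
          simp [PySem.Chars.splitOn.go, List.isPrefixOf, Ne.symm hc]
        rw [h1, ih f (c :: cur) acc (by simpa using Nat.lt_succ_iff.mp (by simpa using hf))]
        rcases hr : splitSpec r with _ | ⟨h, t⟩
        · exact absurd hr (splitSpec_ne_nil r)
        · simp [splitSpec, hr, hc]

theorem splitOn_eq (l : List Char) : PySem.Chars.splitOn l [','] = splitSpec l := by
  unfold PySem.Chars.splitOn
  rw [splitOn_go_eq l (l.length + 1) [] [] (Nat.le_succ _)]
  rcases hr : splitSpec l with _ | ⟨h, t⟩
  · exact absurd hr (splitSpec_ne_nil l)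
  · simp

-- A's computation as a function of the split segments, euros accumulator threaded
def pmAacc : List (List Char) → Int → Bool × Int
  | [s0], e =>
      (match pmLoopA s0 e with
       | none => (false, 0)
       | some eu => (true, eu * 100 + 0))
  | [s0, s1], e =>
      (match pmLoopA s0 e with
       | none => (false, 0)
       | some eu =>
         if s1.length > 2 then (false, 0)
         else match pmLoopA s1 0 with
              | none => (false, 0)
              | some ce => (true, eu * 100 + (if s1.length == 1 then ce * 10 else ce)))
  | _, _ => (false, 0)

-- B's state after the comma, expressed against the remaining (single) segment
def pmBafter (s1 : List Char) (e c : Int) (n : Nat) : Bool × Int :=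
  if n + s1.length > 2 then (false, 0)
  else match pmLoopA s1 c with
       | none => (false, 0)
       | some ce => (true, e * 100 + (if n + s1.length == 1 then ce * 10 else ce))

theorem digit_cond (c : Char) :
    (decide ('0' ≤ c) && decide (c ≤ '9')) = !pmNondigit c := by
  simp [pmNondigit]
  by_cases h1 : c < '0'
  · simp [h1, not_le.mpr h1]
  · by_cases h2 : '9' < c
    · simp [h1, h2, not_le.mpr h2]
    · simp [h1, h2]
      exact ⟨not_lt.mp h1, not_lt.mp h2⟩

theorem pmGo_after (l : List Char) :
    ∀ (e c : Int) (n : Nat), n ≤ 2 →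
    pmGo l true e c n =
      (match splitSpec l with
       | [s1] => pmBafter s1 e c n
       | _ => (false, 0)) := by
  induction l with
  | nil =>
    intro e c n hn
    simp [pmGo, splitSpec, pmBafter, pmLoopA]
    exact hn
  | cons x r ih =>
    intro e c n hn
    by_cases hx : x = ','
    · subst hx
      simp only [pmGo, BEq.rfl, if_true]
      rcases hr : splitSpec r with _ | ⟨h, t⟩
      · exact absurd hr (splitSpec_ne_nil r)
      · simp [splitSpec, hr]
    · have hbe : (x == ',') = false := by simp [hx]
      by_cases hd : pmNondigit x = true
      · -- non-digit, not comma: both reject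
        simp only [pmGo, hbe, Bool.false_eq_true, if_false, digit_cond, hd,
          Bool.not_true, if_false]
        rcases hr : splitSpec r with _ | ⟨h, t⟩
        · exact absurd hr (splitSpec_ne_nil r)
        · rcases t with _ | _
          · simp only [splitSpec, hr, if_neg hx]
            simp [pmBafter, pmLoopA, hd]
          · simp [splitSpec, hr, hx]
      · -- digit
        have hd' : pmNondigit x = false := by simpa using hd
        simp only [pmGo, hbe, Bool.false_eq_true, if_false, digit_cond, hd',
          Bool.not_false, if_true]
        by_cases h2 : n = 2
        · subst h2
          simp only [BEq.rfl, if_true]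
          rcases hr : splitSpec r with _ | ⟨h, t⟩
          · exact absurd hr (splitSpec_ne_nil r)
          · rcases t with _ | _
            · simp only [splitSpec, hr, if_neg hx]
              have hgt : 2 + (h.length + 1) > 2 := by omega
              simp [pmBafter, hgt]
            · simp [splitSpec, hr, hx]
        · have hne : (n == 2) = false := by simp [h2]
          simp only [hne, Bool.false_eq_true, if_false]
          rw [ih e (c * 10 + ((x.toNat : Int) - 48)) (n + 1) (by omega)]
          rcases hr : splitSpec r with _ | ⟨h, t⟩
          · exact absurd hr (splitSpec_ne_nil r)
          · rcases t with _ | _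
            · simp only [splitSpec, hr, if_neg hx]
              simp only [pmBafter, pmLoopA, hd', Bool.false_eq_true, if_false,
                List.length_cons]
              by_cases hgt : 2 < n + 1 + h.length
              · have hgt2 : 2 < n + (h.length + 1) := by omega
                simp [hgt, hgt2]
              · have hgt2 : ¬ 2 < n + (h.length + 1) := by omega
                by_cases h1 : n + 1 + h.length = 1
                · have h1' : n + (h.length + 1) = 1 := by omega
                  cases pmLoopA h (c * 10 + ((x.toNat : Int) - 48)) <;>
                    simp [h1, h1']
                · have h1' : ¬ n + (h.length + 1) = 1 := by omega
                  cases pmLoopA h (c * 10 + ((x.toNat : Int) - 48)) <;>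
                    simp [hgt, hgt2, h1, h1']
            · simp [splitSpec, hr, hx]

theorem pmGo_before (l : List Char) :
    ∀ (e : Int), pmGo l false e 0 0 = pmAacc (splitSpec l) e := by
  induction l with
  | nil =>
    intro e
    simp [pmGo, splitSpec, pmAacc, pmLoopA]
  | cons x r ih =>
    intro e
    by_cases hx : x = ','
    · subst hx
      simp only [pmGo, BEq.rfl, if_true, Bool.false_eq_true, if_false]
      rw [pmGo_after r e 0 0 (by omega)]
      rcases hr : splitSpec r with _ | ⟨h, t⟩
      · exact absurd hr (splitSpec_ne_nil r)
      · rcases t with _ | ⟨h2, t2⟩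
        · simp [splitSpec, hr, pmAacc, pmLoopA, pmBafter]
        · simp [splitSpec, hr, pmAacc]
    · have hbe : (x == ',') = false := by simp [hx]
      by_cases hd : pmNondigit x = true
      · simp only [pmGo, hbe, Bool.false_eq_true, if_false, digit_cond, hd,
          Bool.not_true, if_false]
        rcases hr : splitSpec r with _ | ⟨h, t⟩
        · exact absurd hr (splitSpec_ne_nil r)
        · rcases t with _ | ⟨h2, t2⟩
          · simp only [splitSpec, hr, if_neg hx]
            simp [pmAacc, pmLoopA, hd]
          · rcases t2 with _ | _
            · simp only [splitSpec, hr, if_neg hx]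
              simp [pmAacc, pmLoopA, hd]
            · simp [splitSpec, hr, hx, pmAacc]
      · have hd' : pmNondigit x = false := by simpa using hd
        simp only [pmGo, hbe, Bool.false_eq_true, if_false, digit_cond, hd',
          Bool.not_false, if_true]
        rw [ih (e * 10 + ((x.toNat : Int) - 48))]
        rcases hr : splitSpec r with _ | ⟨h, t⟩
        · exact absurd hr (splitSpec_ne_nil r)
        · rcases t with _ | ⟨h2, t2⟩
          · simp only [splitSpec, hr, if_neg hx]
            simp [pmAacc, pmLoopA, hd']
          · rcases t2 with _ | _
            · simp only [splitSpec, hr, if_neg hx]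
              simp [pmAacc, pmLoopA, hd']
            · simp [splitSpec, hr, hx, pmAacc]

-- ===== VERDICT (by name: the statement is the Claim_ definition above) =====
theorem parseMoney_spec : Claim_equal_parseMoney := by
  intro text _
  show parseMoney text = parseMoney_alt text
  have hmap := PySem.Str.split?_map text ","
  unfold parseMoney parseMoney_alt
  rcases hs : PySem.Str.split? text "," with _ | segs
  · rw [hs] at hmap
    simp [PySem.Chars.split?] at hmap
  · rw [hs] at hmap
    simp only [PySem.Chars.split?, Option.map_some] at hmap
    rw [if_neg (by decide)] at hmap
    have hmap' : segs.map String.toList = splitSpec text.toList := by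
      rw [Option.some.inj hmap, show (",".toList) = [','] from rfl, splitOn_eq]
    rw [pmGo_before text.toList 0, ← hmap']
    rcases segs with _ | ⟨a, _ | ⟨b, _ | ⟨c, t⟩⟩⟩
    · exact absurd hmap'.symm (by simpa using splitSpec_ne_nil text.toList)
    · simp [pmAacc]
    · simp only [List.length_cons, List.length_nil, List.getD,
        List.getElem?_cons_zero, List.getElem?_cons_succ, Option.getD_some]
      simp [pmAacc]
    · simp [pmAacc, List.length_cons]
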